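-- pv_equiv track=rewrite | github.com/Newander/PyDependance-Introspector | src/sql_parser/utils.py | extract_between_curves
-- ===== SOURCE A (Python) =====
-- from typing import Iterator
--
-- def extract_between_curves(iter_query: Iterator[str]) -> list[str]:
--     """ The with condition must start with [select] operand """
--     curves_stack = '('
--     result = [curves_stack]
--     for word in iter_query:
--         result.append(word)
--
--         if word == '(':
--             curves_stack += '('
--         elif word == ')':
--             if len(curves_stack) == 1:
--                 break
--             elif curves_stack[-1] == ')':
--                 raise Exception(result + [word])
--             else:
--                 curves_stack = curves_stack[:-1]
--
--     return result
-- ===== SOURCE B (Python) =====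
-- def extract_between_curves(iter_query):
--     """Recursive-descent re-implementation: consume() eats the shared iterator
--     until the ')' closing its own level, recursing on each '('."""
--     result = ['(']
--     it = iter(iter_query)
--
--     def consume():
--         for word in it:
--             result.append(word)
--             if word == '(':
--                 consume()
--             elif word == ')':
--                 return
--
--     consume()
--     return result
-- ===== Notes on version B (the rewrite author's own statement) =====
-- stated objective: alternative
-- what changed: Replaces the explicit depth-counting loop over a paren-stack string by a recursive-descent consume() over the shared iterator (recurse on '(', return on ')'), dropping A's dead raise branch.
import Mathlib
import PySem

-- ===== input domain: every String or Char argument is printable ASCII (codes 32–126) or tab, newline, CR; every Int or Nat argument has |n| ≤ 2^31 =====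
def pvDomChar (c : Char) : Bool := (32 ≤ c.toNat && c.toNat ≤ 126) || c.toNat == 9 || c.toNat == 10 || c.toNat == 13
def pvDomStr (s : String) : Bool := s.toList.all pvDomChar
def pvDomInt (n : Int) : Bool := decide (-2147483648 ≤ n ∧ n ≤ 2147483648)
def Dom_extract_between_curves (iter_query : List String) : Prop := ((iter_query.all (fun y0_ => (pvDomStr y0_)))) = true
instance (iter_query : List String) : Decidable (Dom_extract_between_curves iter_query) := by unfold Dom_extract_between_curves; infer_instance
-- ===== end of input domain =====

-- B replaces A's depth-counting loop over a paren-stack string by recursive descent over the token stream (alternative decomposition, same cost).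


-- ===== PORT A =====
-- A's loop; curves_stack is kept as its list of characters.
def pvGoA : List String → List Char → List String → List String
  | [], _, result => result
  | word :: ws, curves_stack, result =>
    let result := result ++ [word]
    if word = "(" then pvGoA ws (curves_stack ++ ['(']) result
    else if word = ")" then
      if curves_stack.length = 1 then result
      else if curves_stack.getLast? = some ')' then
        -- Python: raise Exception(...). Unreachable: curves_stack only ever holds '('.
        result
      else pvGoA ws curves_stack.dropLast result
    else pvGoA ws curves_stack result

def extract_between_curves (iter_query : List String) : List String :=
  pvGoA iter_query ['('] ["("]

-- ===== PORT B =====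
-- consume(): collects words (appending to result) until the ')' closing this level,
-- recursing on '('. Returns (words collected, remaining tokens of the shared iterator);
-- the subtype bound on the remainder's length justifies termination.
def pvConsumeB : (l : List String) → { p : List String × List String // p.2.length ≤ l.length }
  | [] => ⟨([], []), by simp⟩
  | word :: ws =>
    if word = "(" then
      let ⟨(inner, rest), h⟩ := pvConsumeB ws
      let ⟨(after, rest'), h'⟩ := pvConsumeB rest
      ⟨(word :: (inner ++ after), rest'), by simp at h h' ⊢; omega⟩
    else if word = ")" then ⟨([word], ws), by simp⟩
    else
      let ⟨(r, rest), h⟩ := pvConsumeB ws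
      ⟨(word :: r, rest), by simp at h ⊢; omega⟩
termination_by l => l.length
decreasing_by all_goals simp_all

def extract_between_curves_alt (iter_query : List String) : List String :=
  "(" :: (pvConsumeB iter_query).1.1

-- ===== PRECONDITION & SPEC =====
def Spec_extract_between_curves (iter_query : List String) (out : List String) : Prop := out = extract_between_curves_alt iter_query
instance (iter_query : List String) (out : List String) : Decidable (Spec_extract_between_curves iter_query out) := by unfold Spec_extract_between_curves; infer_instance

-- ===== CLAIM (what is proved, stated in full; the proofs are below) =====
def Claim_equal_extract_between_curves : Prop := ∀ (iter_query : List String), Dom_extract_between_curves iter_query → Spec_extract_between_curves iter_query (extract_between_curves iter_query)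

-- ===== LEMMAS AND PROOFS =====

-- A at stack depth d+1 equals: B's consume for one level, then A continuing at depth d.
theorem pvGoA_consume (n : Nat) : ∀ (ws : List String), ws.length ≤ n → ∀ (d : Nat) (result : List String),
    pvGoA ws (List.replicate (d+1) '(') result =
      if d = 0 then result ++ (pvConsumeB ws).1.1
      else pvGoA (pvConsumeB ws).1.2 (List.replicate d '(') (result ++ (pvConsumeB ws).1.1) := by
  induction n with
  | zero =>
    intro ws hws d result
    have : ws = [] := List.length_eq_zero_iff.mp (Nat.le_zero.mp hws)
    subst this
    simp [pvGoA, pvConsumeB]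
  | succ n ih =>
    intro ws hws d result
    cases ws with
    | nil =>
      simp [pvGoA, pvConsumeB]
    | cons word ws' =>
      simp only [List.length_cons, Nat.succ_le_succ_iff] at hws
      by_cases hop : word = "("
      · subst hop
        have hdef : pvConsumeB ("(" :: ws') =
            ⟨(("(" : String) :: ((pvConsumeB ws').1.1 ++ (pvConsumeB (pvConsumeB ws').1.2).1.1),
              (pvConsumeB (pvConsumeB ws').1.2).1.2), by
              have h1 := (pvConsumeB ws').2
              have h2 := (pvConsumeB (pvConsumeB ws').1.2).2
              simp; omega⟩ := by
          rw [pvConsumeB]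
          simp
        have hA : pvGoA (("(" : String) :: ws') (List.replicate (d+1) '(') result =
            pvGoA ws' (List.replicate (d+2) '(') (result ++ ["("]) := by
          simp [pvGoA]
          rw [show List.replicate (d+1) '(' ++ ['('] = List.replicate (d+2) '(' by
            rw [← List.replicate_succ' (n := d+1)] ]
        rw [hA, ih ws' hws (d+1) (result ++ ["("])]
        simp only [Nat.add_one_ne_zero, if_false]
        have hrest : (pvConsumeB ws').1.2.length ≤ n := le_trans (pvConsumeB ws').2 hws
        rw [ih _ hrest d (result ++ ["("] ++ (pvConsumeB ws').1.1)]
        rw [hdef]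
        simp [List.append_assoc]
      · by_cases hcl : word = ")"
        · subst hcl
          have hdef : pvConsumeB ((")" : String) :: ws') = ⟨([")"], ws'), by simp⟩ := by
            rw [pvConsumeB]; simp
          cases d with
          | zero =>
            simp [pvGoA, hdef]
          | succ d' =>
            have hrep : List.replicate (d'+2) '(' = List.replicate (d'+1) '(' ++ ['('] := by
              rw [← List.replicate_succ' (n := d'+1)]
            have hA : pvGoA ((")" : String) :: ws') (List.replicate (d'+2) '(') result =
                pvGoA ws' (List.replicate (d'+1) '(') (result ++ [")"]) := by
              simp [pvGoA, hrep]
            rw [hA, hdef]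
            simp
        · have hdef : pvConsumeB (word :: ws') =
              ⟨(word :: (pvConsumeB ws').1.1, (pvConsumeB ws').1.2), by
                have := (pvConsumeB ws').2; simp; omega⟩ := by
            rw [pvConsumeB]
            simp [hop, hcl]
          have hA : pvGoA (word :: ws') (List.replicate (d+1) '(') result =
              pvGoA ws' (List.replicate (d+1) '(') (result ++ [word]) := by
            simp [pvGoA, hop, hcl]
          rw [hA, ih ws' hws d (result ++ [word]), hdef]
          simp [List.append_assoc]

-- ===== VERDICT (by name: the statement is the Claim_ definition above) =====
theorem extract_between_curves_spec : Claim_equal_extract_between_curves := by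
  intro iter_query _
  unfold Spec_extract_between_curves extract_between_curves extract_between_curves_alt
  have h := pvGoA_consume iter_query.length iter_query le_rfl 0 ["("]
  simpa using h
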